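-- pv_equiv track=rewrite | github.com/pypi-data/pypi-mirror-30 | packages/reflowrst/reflowrst-1.1.0.tar.gz/reflowrst-1.1.0/reflowrst/tools/data2rst.py | convertToSpans
-- ===== SOURCE A (Python) =====
-- def getSpan(spans, row, column):
--     """checks if a row,column is in spans"""
--     for i in range(len(spans)):
--         if [row, column] in spans[i]:
--             return spans[i]
--     return None
--
-- def convertToSpans(table, spans):
--     """Converts all cells to spans"""
--     new_spans = []
--     for row in range(len(table)):
--         for column in range(len(table[row])):
--             span = getSpan(spans, row, column)
--             if not span:
--                 new_spans.append([[row, column]])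
--     new_spans.extend(spans)
--     new_spans = list(sorted(new_spans))
--     return new_spans
-- ===== SOURCE B (Python) =====
-- def convertToSpans(table, spans):
--     """Converts all cells to spans"""
--     # Inverted strategy: start from a grid of 'still free' flags and let the
--     # spans themselves delete the cells they cover; then sweep the grid once.
--     remaining = [[True] * len(row) for row in table]
--     for span in spans:
--         for coord in span:
--             if len(coord) == 2:
--                 r, c = coord
--                 if 0 <= r < len(remaining) and 0 <= c < len(remaining[r]):
--                     remaining[r][c] = False
--     new_spans = [[[r, c]] for r, flags in enumerate(remaining)
--                  for c, flag in enumerate(flags) if flag]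
--     new_spans.extend(spans)
--     new_spans.sort()
--     return new_spans
-- ===== Notes on version B (the rewrite author's own statement) =====
-- stated objective: faster
-- what changed: Inverts the traversal: instead of scanning the span list for every cell (getSpan), B lets each span coordinate delete its cell from a boolean grid of free cells, then sweeps the grid once to emit the leftover singletons before sorting.
import Mathlib
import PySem

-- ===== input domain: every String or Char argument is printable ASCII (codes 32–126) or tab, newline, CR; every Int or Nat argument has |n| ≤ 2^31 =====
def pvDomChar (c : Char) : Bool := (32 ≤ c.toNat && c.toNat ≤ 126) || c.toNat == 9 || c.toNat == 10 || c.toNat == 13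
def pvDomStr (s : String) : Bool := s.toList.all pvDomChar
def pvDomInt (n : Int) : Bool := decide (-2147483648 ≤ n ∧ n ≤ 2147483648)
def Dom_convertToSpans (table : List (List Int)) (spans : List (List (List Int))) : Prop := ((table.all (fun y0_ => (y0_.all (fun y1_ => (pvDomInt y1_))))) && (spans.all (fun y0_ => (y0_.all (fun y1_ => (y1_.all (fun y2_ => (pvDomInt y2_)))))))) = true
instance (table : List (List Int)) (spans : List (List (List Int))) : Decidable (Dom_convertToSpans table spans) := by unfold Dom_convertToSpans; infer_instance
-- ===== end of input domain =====

-- B inverts A's search: spans delete their cells from a boolean grid, then one sweep emits the leftover singletons (return value equivalence; B does not mutate its arguments, matching A).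


-- ===== PORT A =====
-- 'for i in range(len(spans)): if [row, column] in spans[i]: return spans[i]; return None'
def getSpan (spans : List (List (List Int))) (row column : Int) : Option (List (List Int)) :=
  match spans with
  | [] => none
  | s :: rest => if [row, column] ∈ s then some s else getSpan rest row column

def convertToSpans (table : List (List Int)) (spans : List (List (List Int))) : List (List (List Int)) :=
  let new_spans : List (List (List Int)) :=
    (PySem.List.pyRange 0 table.length 1).foldl (fun acc row =>
      (PySem.List.pyRange 0 (PySem.List.pyGetD table row []).length 1).foldl (fun acc2 column =>
        -- 'if not span' : falsy when span is None or the empty list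
        match getSpan spans row column with
        | none => acc2 ++ [[[row, column]]]
        | some s => if s = [] then acc2 ++ [[[row, column]]] else acc2) acc) []
  let new_spans2 := new_spans ++ spans
  PySem.List.sorted new_spans2 (fun x => x) false

-- ===== PORT B =====
-- 'if len(coord) == 2: r, c = coord; if 0 <= r < len(remaining) and 0 <= c < len(remaining[r]): remaining[r][c] = False'
def markCell (rem : List (List Bool)) (coord : List Int) : List (List Bool) :=
  match coord with
  | [r, c] =>
      if 0 ≤ r ∧ r < (rem.length : Int) ∧ 0 ≤ c ∧ c < ((rem.getD r.toNat []).length : Int)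
      then rem.modify r.toNat (fun row => row.set c.toNat false)
      else rem
  | _ => rem

def convertToSpans_alt (table : List (List Int)) (spans : List (List (List Int))) : List (List (List Int)) :=
  let remaining0 : List (List Bool) := table.map (fun row => row.map (fun _ => true))
  let remaining : List (List Bool) :=
    spans.foldl (fun rem span => span.foldl markCell rem) remaining0
  let new_spans : List (List (List Int)) :=
    (PySem.List.enumerate remaining).flatMap (fun rf =>
      ((PySem.List.enumerate rf.2).filter (fun cf => cf.2)).map (fun cf => [[rf.1, cf.1]]))
  PySem.List.sorted (new_spans ++ spans) (fun x => x) false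

-- ===== PRECONDITION & SPEC =====
def Spec_convertToSpans (table : List (List Int)) (spans : List (List (List Int))) (out : List (List (List Int))) : Prop := out = convertToSpans_alt table spans
instance (table : List (List Int)) (spans : List (List (List Int))) (out : List (List (List Int))) : Decidable (Spec_convertToSpans table spans out) := by unfold Spec_convertToSpans; infer_instance

-- ===== CLAIM (what is proved, stated in full; the proofs are below) =====
def Claim_equal_convertToSpans : Prop := ∀ (table : List (List Int)) (spans : List (List (List Int))), Dom_convertToSpans table spans → Spec_convertToSpans table spans (convertToSpans table spans)

-- ===== LEMMAS AND PROOFS =====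

-- the flag grid read at Nat coordinates (out-of-range reads give the defaults)
def getN (g : List (List Bool)) (r c : Nat) : Bool := (g.getD r []).getD c false

-- getSpan only ever returns a span that CONTAINS the coordinate, hence never the empty list
theorem getSpan_ne_some_nil (spans : List (List (List Int))) (row column : Int) :
    getSpan spans row column ≠ some [] := by
  induction spans with
  | nil => simp [getSpan]
  | cons s rest ih =>
      simp only [getSpan]
      split_ifs with h
      · intro hc; simp at hc; subst hc; simp at h
      · exact ih

-- getSpan is none iff no span contains the coordinate
theorem getSpan_eq_none_iff (spans : List (List (List Int))) (row column : Int) :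
    getSpan spans row column = none ↔ ∀ s ∈ spans, [row, column] ∉ s := by
  induction spans with
  | nil => simp [getSpan]
  | cons s rest ih =>
      simp only [getSpan]
      split_ifs with h
      · simp; intro hmem; exact absurd h hmem
      · simp [ih, h]

-- modify with a length-preserving function preserves the length profile
theorem map_length_modify (g : List (List Bool)) (i : Nat) (f : List Bool → List Bool)
    (hf : ∀ x, (f x).length = x.length) :
    (g.modify i f).map List.length = g.map List.length := by
  apply List.ext_getElem
  · simp
  · intro k h1 h2
    simp only [List.getElem_map]
    rw [List.getElem_modify]
    split_ifs with h
    · rw [hf]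
    · rfl

theorem markCell_shape (g : List (List Bool)) (coord : List Int) :
    (markCell g coord).map List.length = g.map List.length := by
  match coord with
  | [] => rfl
  | [_] => rfl
  | _ :: _ :: _ :: _ => rfl
  | [r, c] =>
      simp only [markCell]
      split_ifs with h
      · exact map_length_modify g r.toNat _ (fun x => List.length_set)
      · rfl

theorem shape_row_len {α β : Type} {g : List (List α)} {h : List (List β)} (hs : g.map List.length = h.map List.length)
    (r : Nat) : (g.getD r []).length = (h.getD r []).length := by
  have hl : g.length = h.length := by
    have := congrArg List.length hs; simpa using this
  by_cases hr : r < g.length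
  · have hr' : r < h.length := hl ▸ hr
    rw [List.getD_eq_getElem _ _ hr, List.getD_eq_getElem _ _ hr']
    have := congrArg (fun xs => xs.getD r 0) hs
    simpa [List.getD_eq_getElem, hr, hr'] using this
  · have hr' : ¬ r < h.length := hl ▸ hr
    rw [List.getD_eq_default _ _ (by omega), List.getD_eq_default _ _ (by omega)]
    rfl

theorem markCell_getN (g : List (List Bool)) (coord : List Int) (r c : Nat)
    (hr : r < g.length) (hc : c < (g.getD r []).length) :
    getN (markCell g coord) r c = (getN g r c && !(decide (coord = [(r : Int), (c : Int)]))) := by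
  match coord with
  | [] => simp [markCell]
  | [_] => simp [markCell]
  | _ :: _ :: _ :: _ => simp [markCell]
  | [a, b] =>
      simp only [markCell]
      split_ifs with h
      · obtain ⟨ha0, hal, hb0, hbl⟩ := h
        have hml : (g.modify a.toNat (fun row => row.set b.toNat false)).length = g.length :=
          List.length_modify _ _ _
        have hrow : (g.modify a.toNat (fun row => row.set b.toNat false)).getD r []
            = if a.toNat = r then (g[r]'hr).set b.toNat false else g[r]'hr := by
          rw [List.getD_eq_getElem _ _ (by omega : r < (g.modify a.toNat (fun row => row.set b.toNat false)).length)]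
          rw [List.getElem_modify]
        have hgr : g.getD r [] = g[r]'hr := List.getD_eq_getElem _ _ hr
        by_cases har : a.toNat = r
        · rw [getN, hrow, if_pos har]
          have hcl : c < ((g[r]'hr).set b.toNat false).length := by
            rw [List.length_set, ← hgr]; exact hc
          rw [List.getD_eq_getElem _ _ hcl, List.getElem_set]
          by_cases hbc : b.toNat = c
          · have hae : a = (r : Int) := by omega
            have hbe : b = (c : Int) := by omega
            simp [getN, hae, hbe]
          · have hbe : b ≠ (c : Int) := by omega
            rw [if_neg hbc]
            have hc2 : c < (g[r]'hr).length := by rw [← hgr]; exact hc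
            have hval : getN g r c = (g[r]'hr)[c]'hc2 := by
              rw [getN, hgr]; exact List.getD_eq_getElem _ _ hc2
            simp [hval, hbe]
        · have hae : a ≠ (r : Int) := by omega
          have hc2 : c < (g[r]'hr).length := by rw [← hgr]; exact hc
          have hval : getN g r c = (g[r]'hr)[c]'hc2 := by
            rw [getN, hgr]; exact List.getD_eq_getElem _ _ hc2
          rw [getN, hrow, if_neg har, List.getD_eq_getElem _ _ hc2]
          simp [hval, hae]
      · have hne : ¬ ([a, b] = [(r : Int), (c : Int)]) := by
          intro he
          simp at he
          obtain ⟨hae, hbe⟩ := he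
          apply h
          subst hae; subst hbe
          refine ⟨by positivity, by exact_mod_cast hr, by positivity, ?_⟩
          have : ((r : Int)).toNat = r := rfl
          rw [this]
          exact_mod_cast hc
        simp [hne]

theorem foldCoords_shape (coords : List (List Int)) (g : List (List Bool)) :
    (coords.foldl markCell g).map List.length = g.map List.length := by
  induction coords generalizing g with
  | nil => rfl
  | cons coord rest ih => rw [List.foldl_cons, ih, markCell_shape]

theorem foldCoords_getN (coords : List (List Int)) (g : List (List Bool)) (r c : Nat)
    (hr : r < g.length) (hc : c < (g.getD r []).length) :
    getN (coords.foldl markCell g) r c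
      = (getN g r c && !(decide ([(r : Int), (c : Int)] ∈ coords))) := by
  induction coords generalizing g with
  | nil => simp
  | cons coord rest ih =>
      have hs := markCell_shape g coord
      have hl : (markCell g coord).length = g.length := by
        have := congrArg List.length hs; simpa using this
      have hr' : r < (markCell g coord).length := by omega
      have hc' : c < ((markCell g coord).getD r []).length := by
        rw [shape_row_len hs]; exact hc
      rw [List.foldl_cons, ih _ hr' hc', markCell_getN g coord r c hr hc]
      simp [List.mem_cons, Bool.and_assoc, eq_comm]

theorem foldSpans_shape (spans : List (List (List Int))) (g : List (List Bool)) :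
    (spans.foldl (fun rem span => span.foldl markCell rem) g).map List.length = g.map List.length := by
  induction spans generalizing g with
  | nil => rfl
  | cons span rest ih => rw [List.foldl_cons, ih, foldCoords_shape]

theorem foldSpans_getN (spans : List (List (List Int))) (g : List (List Bool)) (r c : Nat)
    (hr : r < g.length) (hc : c < (g.getD r []).length) :
    getN (spans.foldl (fun rem span => span.foldl markCell rem) g) r c
      = (getN g r c && !(spans.any (fun span => decide ([(r : Int), (c : Int)] ∈ span)))) := by
  induction spans generalizing g with
  | nil => simp
  | cons span rest ih =>
      have hs := foldCoords_shape span g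
      have hl : (span.foldl markCell g).length = g.length := by
        have := congrArg List.length hs; simpa using this
      have hr' : r < (span.foldl markCell g).length := by omega
      have hc' : c < ((span.foldl markCell g).getD r []).length := by
        rw [shape_row_len hs]; exact hc
      rw [List.foldl_cons, ih _ hr' hc', foldCoords_getN span g r c hr hc]
      simp [Bool.and_assoc]

-- the grid B starts from: every cell still free
def gridOf (table : List (List Int)) : List (List Bool) :=
  table.map (fun row => row.map (fun _ => true))

theorem grid_shape (table : List (List Int)) :
    (gridOf table).map List.length = table.map List.length := by
  simp [gridOf]

theorem grid_getN (table : List (List Int)) (r c : Nat)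
    (hr : r < table.length) (hc : c < (table.getD r []).length) :
    getN (gridOf table) r c = true := by
  have hr' : r < (gridOf table).length := by simp [gridOf]; omega
  have hrow : (gridOf table).getD r [] = (table[r]'hr).map (fun _ => true) := by
    rw [List.getD_eq_getElem _ _ hr']
    simp [gridOf]
  have hc' : c < (table[r]'hr).length := by
    rw [← List.getD_eq_getElem _ ([] : List Int) hr]; exact hc
  rw [getN, hrow, List.getD_eq_getElem _ _ (by simpa using hc')]
  simp

theorem remaining_getN (table : List (List Int)) (spans : List (List (List Int))) (r c : Nat)
    (hr : r < table.length) (hc : c < (table.getD r []).length) :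
    getN (spans.foldl (fun rem span => span.foldl markCell rem) (gridOf table)) r c
      = !(spans.any (fun span => decide ([(r : Int), (c : Int)] ∈ span))) := by
  have hr' : r < (gridOf table).length := by simp [gridOf]; omega
  have hc' : c < ((gridOf table).getD r []).length := by
    rw [shape_row_len (grid_shape table)]; exact hc
  rw [foldSpans_getN spans (gridOf table) r c hr' hc', grid_getN table r c hr hc]
  simp

theorem singles_eq (table : List (List Int)) (spans : List (List (List Int))) :
    ((PySem.List.pyRange 0 table.length 1).foldl (fun acc row =>
      (PySem.List.pyRange 0 (PySem.List.pyGetD table row []).length 1).foldl (fun acc2 column =>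
        match getSpan spans row column with
        | none => acc2 ++ [[[row, column]]]
        | some s => if s = [] then acc2 ++ [[[row, column]]] else acc2) acc) [])
    = (PySem.List.enumerate (spans.foldl (fun rem span => span.foldl markCell rem) (gridOf table))).flatMap
        (fun rf => ((PySem.List.enumerate rf.2).filter (fun cf => cf.2)).map (fun cf => [[rf.1, cf.1]])) := by
  -- A side: per-cell match = filtered append
  have hfun : ∀ row : Int, (fun (acc2 : List (List (List Int))) (column : Int) =>
      match getSpan spans row column with
      | none => acc2 ++ [[[row, column]]]
      | some s => if s = [] then acc2 ++ [[[row, column]]] else acc2)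
    = fun acc2 column =>
      if (!(spans.any (fun span => decide ([row, column] ∈ span)))) = true
      then acc2 ++ [[[row, column]]] else acc2 := by
    intro row; funext acc2 column
    cases hg : getSpan spans row column with
    | none =>
        have h1 : ∀ s ∈ spans, [row, column] ∉ s := (getSpan_eq_none_iff spans row column).mp hg
        have h2 : spans.any (fun span => decide ([row, column] ∈ span)) = false := by
          simp only [List.any_eq_false]; intro s hs; simpa using h1 s hs
        simp [h2]
    | some s =>
        have hne : s ≠ [] := fun h => getSpan_ne_some_nil spans row column (h ▸ hg)
        have h2 : spans.any (fun span => decide ([row, column] ∈ span)) = true := by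
          by_contra hfalse
          have : spans.any (fun span => decide ([row, column] ∈ span)) = false := by
            cases hb : spans.any (fun span => decide ([row, column] ∈ span)) <;> simp_all
          have := (getSpan_eq_none_iff spans row column).mpr (by
            intro t ht; have := List.any_eq_false.mp this t ht; simpa using this)
          rw [this] at hg; cases hg
        simp [h2, hne]
  have houter : (fun (acc : List (List (List Int))) (row : Int) =>
      (PySem.List.pyRange 0 (PySem.List.pyGetD table row []).length 1).foldl (fun acc2 column =>
        match getSpan spans row column with
        | none => acc2 ++ [[[row, column]]]
        | some s => if s = [] then acc2 ++ [[[row, column]]] else acc2) acc)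
    = fun acc row => acc ++ ((PySem.List.pyRange 0 (PySem.List.pyGetD table row []).length 1).filter
        (fun column => !(spans.any (fun span => decide ([row, column] ∈ span))))).map
        (fun column => [[row, column]]) := by
    funext acc row
    rw [hfun row, PySem.List.foldl_append_if]
  rw [houter, PySem.List.foldl_append_eq_flatMap, List.nil_append]
  -- B side: turn both enumerates into pyRanges
  have hshape : (spans.foldl (fun rem span => span.foldl markCell rem) (gridOf table)).map List.length
      = table.map List.length :=
    (foldSpans_shape spans (gridOf table)).trans (grid_shape table)
  have hlen : (spans.foldl (fun rem span => span.foldl markCell rem) (gridOf table)).length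
      = table.length := by
    have := congrArg List.length hshape; simpa using this
  rw [PySem.List.enumerate_eq_map_pyRange _ [], List.flatMap_map]
  simp only [PySem.List.len, hlen]
  apply List.flatMap_congr
  intro row hrowmem
  obtain ⟨hrow0, hrowlt⟩ := PySem.List.mem_pyRange_one.mp hrowmem
  obtain ⟨r, rfl⟩ : ∃ r : Nat, row = (r : Int) := ⟨row.toNat, (Int.toNat_of_nonneg hrow0).symm⟩
  have hr : r < table.length := by exact_mod_cast hrowlt
  rw [PySem.List.enumerate_eq_map_pyRange _ false, List.filter_map, List.map_map]
  simp only [PySem.List.pyGetD_natCast, PySem.List.len]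
  rw [shape_row_len hshape r]
  have hmap : ((fun cf : Int × Bool => [[(r : Int), cf.1]]) ∘
      (fun c => (c, PySem.List.pyGetD ((spans.foldl (fun rem span => span.foldl markCell rem) (gridOf table)).getD r []) c false)))
      = fun c => [[(r : Int), c]] := rfl
  rw [hmap]
  congr 1
  apply List.filter_congr
  intro col hcolmem
  obtain ⟨hcol0, hcollt⟩ := PySem.List.mem_pyRange_one.mp hcolmem
  obtain ⟨c, rfl⟩ : ∃ c : Nat, col = (c : Int) := ⟨col.toNat, (Int.toNat_of_nonneg hcol0).symm⟩
  have hc : c < (table.getD r []).length := by exact_mod_cast hcollt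
  simp only [Function.comp_apply, PySem.List.pyGetD_natCast]
  exact (remaining_getN table spans r c hr hc).symm

-- ===== VERDICT (by name: the statement is the Claim_ definition above) =====
theorem convertToSpans_spec : Claim_equal_convertToSpans := by
  intro table spans _
  unfold Spec_convertToSpans convertToSpans convertToSpans_alt
  simp only []
  congr 1
  exact congrArg (fun l => l ++ spans) (singles_eq table spans)
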